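-- pv_equiv track=rewrite | github.com/BioSTEAMDevelopmentGroup/thermosteam | thermosteam/properties/identifiers.py | checkCAS
-- ===== SOURCE A (Python) =====
-- def checkCAS(CASRN):
--     """Checks if a CAS number is valid. Returns False if the parser cannot
--     parse the given string..
--
--     Parameters
--     ----------
--     CASRN : string
--         A three-piece, dash-separated set of numbers
--
--     Returns
--     -------
--     result : bool
--         Boolean value if CASRN was valid. If parsing fails, return False also.
--
--     Notes
--     -----
--     Check method is according to Chemical Abstract Society. However, no lookup
--     to their service is performed; therefore, this function cannot detect
--     false positives.
--
--     Function also does not support additional separators, apart from '-'.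
--
--     CAS numbers up to the series 1 XXX XXX-XX-X are now being issued.
--
--     A long can hold CAS numbers up to 2 147 483-64-7
--
--     Examples
--     --------
--     >>> checkCAS('7732-18-5')
--     True
--     >>> checkCAS('77332-18-5')
--     False
--     """
--     try:
--         check = CASRN[-1]
--         CASRN = CASRN[::-1][1:]
--         productsum = 0
--         i = 1
--         for num in CASRN:
--             if num != '-':
--                 productsum += i*int(num)
--                 i += 1
--         return (productsum % 10 == int(check))
--     except:
--         return False
-- ===== SOURCE B (Python) =====
-- def checkCAS(CASRN):
--     # Left-to-right single pass using the prefix-sum identity: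
--     # sum_j (n-j+1)*d_j == sum over prefixes of the running digit sum.
--     # No string reversal and no positional weight counter are needed.
--     try:
--         check = int(CASRN[-1])
--     except (IndexError, ValueError):
--         return False
--     S = T = 0
--     for c in CASRN[:-1]:
--         if c == '-':
--             continue
--         try:
--             S += int(c)
--         except ValueError:
--             return False
--         T += S
--     return T % 10 == check
-- ===== Notes on version B (the rewrite author's own statement) =====
-- stated objective: alternative
-- what changed: A's reverse-scan with an explicitly incremented positional weight counter is replaced by a single left-to-right pass that keeps a running digit sum S and adds it to a running total T at each digit (prefix-sum identity: the sum of prefix sums equals the right-to-left positionally weighted sum), so no reversal and no weight counter exist in B.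
import Mathlib
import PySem

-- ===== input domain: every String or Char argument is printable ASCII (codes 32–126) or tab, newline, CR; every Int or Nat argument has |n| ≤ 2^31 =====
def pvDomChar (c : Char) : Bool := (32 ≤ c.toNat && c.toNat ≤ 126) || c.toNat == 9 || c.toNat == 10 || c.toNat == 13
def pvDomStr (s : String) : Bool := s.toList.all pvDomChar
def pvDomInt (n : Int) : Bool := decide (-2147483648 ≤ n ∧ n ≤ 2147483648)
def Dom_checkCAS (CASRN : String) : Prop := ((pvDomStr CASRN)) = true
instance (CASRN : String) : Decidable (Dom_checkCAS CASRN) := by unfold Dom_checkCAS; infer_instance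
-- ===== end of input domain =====

-- B replaces A's reverse-scan with an explicit weight counter by a single left-to-right pass
-- keeping a running digit sum S and a running total T += S (prefix-sum identity); same return
-- value on every input (both are total: Python's try/except False is modelled by Option).

-- ===== PORT A =====
-- the for-loop of A: state (productsum, i); int(num) may raise (none)
def pvALoop : List Char → Int → Int → Option (Int × Int)
  | [], ps, i => some (ps, i)
  | c :: rest, ps, i =>
    if c ≠ '-' then
      match PySem.Int.ofChars? [c] with
      | none => none
      | some d => pvALoop rest (ps + i * d) (i + 1)
    else pvALoop rest ps i

def checkCAS (CASRN : String) : Bool :=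
  match PySem.Str.pyGet? CASRN (-1) with          -- check = CASRN[-1]; IndexError → except
  | none => false
  | some check =>
    match PySem.List.slice? CASRN.toList none none (-1) with   -- CASRN[::-1]
    | none => false
    | some rev =>
      let body := PySem.List.slice rev (some 1) none           -- …[1:]
      match pvALoop body 0 1 with
      | none => false
      | some ps =>
        match PySem.Int.ofChars? [check] with                  -- int(check); ValueError → except
        | none => false
        | some c => PySem.Int.mod ps.1 10 == c

-- ===== PORT B =====
-- the for-loop of B: state (S, T); '-' skipped; int(c) may raise (none → return False)
def pvBLoop : List Char → Int → Int → Option Int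
  | [], _, T => some T
  | c :: rest, S, T =>
    if c = '-' then pvBLoop rest S T
    else
      match PySem.Int.ofChars? [c] with
      | none => none
      | some d => pvBLoop rest (S + d) (T + (S + d))

def checkCAS_alt (CASRN : String) : Bool :=
  match PySem.Str.pyGet? CASRN (-1) with          -- CASRN[-1]; IndexError → except
  | none => false
  | some ch =>
    match PySem.Int.ofChars? [ch] with            -- check = int(CASRN[-1]); ValueError → except
    | none => false
    | some check =>
      match pvBLoop (PySem.List.slice CASRN.toList none (some (-1))) 0 0 with  -- CASRN[:-1]
      | none => false
      | some T => PySem.Int.mod T 10 == check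

-- ===== PRECONDITION & SPEC =====
def Spec_checkCAS (CASRN : String) (out : Bool) : Prop := out = checkCAS_alt CASRN
instance (CASRN : String) (out : Bool) : Decidable (Spec_checkCAS CASRN out) := by unfold Spec_checkCAS; infer_instance

-- ===== CLAIM (what is proved, stated in full; the proofs are below) =====
def Claim_equal_checkCAS : Prop := ∀ (CASRN : String), Dom_checkCAS CASRN → Spec_checkCAS CASRN (checkCAS CASRN)

-- ===== LEMMAS AND PROOFS =====

-- proof-only abstraction: the digit values of the non-dash chars (none if any fails to parse)
def pvDigits? : List Char → Option (List Int)
  | [] => some []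
  | c :: rest =>
    if c ≠ '-' then
      match PySem.Int.ofChars? [c] with
      | none => none
      | some d => (pvDigits? rest).map (fun ds => d :: ds)
    else pvDigits? rest

-- weighted sum of a digit list with weights starting at i
def pvWSum : List Int → Int → Int
  | [], _ => 0
  | d :: ds, i => i * d + pvWSum ds (i + 1)

-- running-prefix total of B's loop, started with digit sum S
def pvG : Int → List Int → Int
  | _, [] => 0
  | S, d :: ds => (S + d) + pvG (S + d) ds

theorem pvDigits?_append (l m : List Char) :
    pvDigits? (l ++ m) =
      (pvDigits? l).bind (fun a => (pvDigits? m).map (fun b => a ++ b)) := by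
  induction l with
  | nil =>
    simp only [List.nil_append, pvDigits?, Option.bind_some]
    cases pvDigits? m <;> rfl
  | cons c rest ih =>
    simp only [List.cons_append, pvDigits?]
    split
    · cases h : PySem.Int.ofChars? [c] with
      | none => rfl
      | some d =>
        simp only [ih]
        cases pvDigits? rest <;> cases hm : pvDigits? m <;> simp
    · exact ih

theorem pvDigits?_reverse (l : List Char) :
    pvDigits? l.reverse = (pvDigits? l).map List.reverse := by
  induction l with
  | nil => rfl
  | cons c rest ih =>
    simp only [List.reverse_cons, pvDigits?_append, ih, pvDigits?]
    split
    · cases PySem.Int.ofChars? [c] with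
      | none => cases pvDigits? rest <;> simp
      | some d => cases pvDigits? rest <;> simp
    · cases pvDigits? rest <;> simp

theorem pvALoop_eq (l : List Char) (ps i : Int) :
    pvALoop l ps i =
      (pvDigits? l).map (fun ds => (ps + pvWSum ds i, i + ds.length)) := by
  induction l generalizing ps i with
  | nil => simp [pvALoop, pvDigits?, pvWSum]
  | cons c rest ih =>
    simp only [pvALoop, pvDigits?]
    split
    · cases PySem.Int.ofChars? [c] with
      | none => rfl
      | some d =>
        simp only [ih]
        cases pvDigits? rest with
        | none => rfl
        | some ds =>
          simp [pvWSum]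
          constructor
          · ring
          · ring
    · exact ih ps i

theorem pvBLoop_eq (l : List Char) (S T : Int) :
    pvBLoop l S T = (pvDigits? l).map (fun ds => T + pvG S ds) := by
  induction l generalizing S T with
  | nil => simp [pvBLoop, pvDigits?, pvG]
  | cons c rest ih =>
    simp only [pvBLoop, pvDigits?]
    by_cases hc : c = '-'
    · simp [hc, ih]
    · rw [if_neg hc, if_pos hc]
      cases PySem.Int.ofChars? [c] with
      | none => rfl
      | some d =>
        simp only [ih]
        cases pvDigits? rest with
        | none => rfl
        | some ds => simp only [Option.map_some, pvG]; ring

theorem pvG_shift (ds : List Int) (S : Int) :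
    pvG S ds = ds.length * S + pvG 0 ds := by
  induction ds generalizing S with
  | nil => simp [pvG]
  | cons d ds ih =>
    simp only [pvG, List.length_cons]
    rw [ih (S + d), ih (0 + d)]
    push_cast
    ring

theorem pvWSum_append (l m : List Int) (i : Int) :
    pvWSum (l ++ m) i = pvWSum l i + pvWSum m (i + l.length) := by
  induction l generalizing i with
  | nil => simp [pvWSum]
  | cons d l ih =>
    simp only [List.cons_append, pvWSum, ih, List.length_cons]
    push_cast
    ring

theorem pvG_eq_wsum_reverse (ds : List Int) :
    pvG 0 ds = pvWSum ds.reverse 1 := by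
  induction ds with
  | nil => rfl
  | cons d ds ih =>
    simp only [pvG, List.reverse_cons, pvWSum_append, pvWSum, List.length_reverse]
    rw [pvG_shift ds (0 + d), ih]
    ring

-- ===== VERDICT (by name: the statement is the Claim_ definition above) =====
theorem checkCAS_spec : Claim_equal_checkCAS := by
  intro CASRN _
  unfold Spec_checkCAS checkCAS checkCAS_alt
  cases hg : PySem.Str.pyGet? CASRN (-1) with
  | none => rfl
  | some ch =>
    have hbodyA : PySem.List.slice CASRN.toList.reverse (some 1) none
        = CASRN.toList.dropLast.reverse := by
      rw [PySem.List.slice_from_one]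
      exact List.tail_reverse
    simp only [PySem.List.slice?_none_none_neg_one, hbodyA, PySem.List.slice_to_neg_one,
      pvALoop_eq, pvBLoop_eq, pvDigits?_reverse]
    cases hd : pvDigits? CASRN.toList.dropLast with
    | none => cases PySem.Int.ofChars? [ch] <;> rfl
    | some digits =>
      cases hc : PySem.Int.ofChars? [ch] with
      | none => rfl
      | some check =>
        simp only [Option.map_some]
        rw [pvG_eq_wsum_reverse]
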